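-- pv_equiv track=rewrite | github.com/afrojuju1/spreads | src/spreads/services/sessions.py | _reconciliation_snapshot
-- ===== SOURCE A (Python) =====
-- from collections.abc import Iterable, Mapping
-- from typing import Any
--
-- def _reconciliation_snapshot(portfolio: Mapping[str, Any]) -> dict[str, Any]:
--     positions = portfolio.get("positions")
--     if not isinstance(positions, list) or not positions:
--         return {
--             "status": "clear",
--             "note": "No session positions are open for reconciliation.",
--         }
--
--     open_positions = [
--         position
--         for position in positions
--         if isinstance(position, Mapping) and str(position.get("position_status") or "") in {"open", "partial_close"}
--     ]
--     if not open_positions: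
--         return {
--             "status": "clear",
--             "note": "No session positions are open for reconciliation.",
--         }
--
--     mismatch_positions = [
--         position
--         for position in open_positions
--         if str(position.get("reconciliation_status") or "") == "mismatch"
--     ]
--     if mismatch_positions:
--         return {
--             "status": "mismatch",
--             "note": f"{len(mismatch_positions)} open position(s) have broker reconciliation mismatches.",
--         }
--
--     pending_positions = [
--         position
--         for position in open_positions
--         if not position.get("last_reconciled_at")
--     ]
--     if pending_positions:
--         return {
--             "status": "pending",
--             "note": f"{len(pending_positions)} open position(s) are waiting for broker reconciliation.",
--         }
--     return {
--         "status": "matched",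
--         "note": "Open positions match the broker inventory snapshot.",
--     }
-- ===== SOURCE B (Python) =====
-- from collections.abc import Mapping
-- from typing import Any
--
-- def _reconciliation_snapshot(portfolio: Mapping[str, Any]) -> dict[str, Any]:
--     positions = portfolio.get("positions")
--     if not isinstance(positions, list) or not positions:
--         return {
--             "status": "clear",
--             "note": "No session positions are open for reconciliation.",
--         }
--     open_count = mismatch_count = pending_count = 0
--     for position in positions:
--         if not isinstance(position, Mapping):
--             continue
--         if str(position.get("position_status") or "") not in {"open", "partial_close"}:
--             continue
--         open_count += 1
--         if str(position.get("reconciliation_status") or "") == "mismatch":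
--             mismatch_count += 1
--         if not position.get("last_reconciled_at"):
--             pending_count += 1
--     if open_count == 0:
--         return {
--             "status": "clear",
--             "note": "No session positions are open for reconciliation.",
--         }
--     if mismatch_count:
--         return {
--             "status": "mismatch",
--             "note": f"{mismatch_count} open position(s) have broker reconciliation mismatches.",
--         }
--     if pending_count:
--         return {
--             "status": "pending",
--             "note": f"{pending_count} open position(s) are waiting for broker reconciliation.",
--         }
--     return {
--         "status": "matched",
--         "note": "Open positions match the broker inventory snapshot.",
--     }
-- ===== Notes on version B (the rewrite author's own statement) =====
-- stated objective: simpler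
-- what changed: Replaces the three list comprehensions (building open, mismatch and pending position lists) with a single pass over positions that maintains three integer counters, then branches on the counters.
import Mathlib
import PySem

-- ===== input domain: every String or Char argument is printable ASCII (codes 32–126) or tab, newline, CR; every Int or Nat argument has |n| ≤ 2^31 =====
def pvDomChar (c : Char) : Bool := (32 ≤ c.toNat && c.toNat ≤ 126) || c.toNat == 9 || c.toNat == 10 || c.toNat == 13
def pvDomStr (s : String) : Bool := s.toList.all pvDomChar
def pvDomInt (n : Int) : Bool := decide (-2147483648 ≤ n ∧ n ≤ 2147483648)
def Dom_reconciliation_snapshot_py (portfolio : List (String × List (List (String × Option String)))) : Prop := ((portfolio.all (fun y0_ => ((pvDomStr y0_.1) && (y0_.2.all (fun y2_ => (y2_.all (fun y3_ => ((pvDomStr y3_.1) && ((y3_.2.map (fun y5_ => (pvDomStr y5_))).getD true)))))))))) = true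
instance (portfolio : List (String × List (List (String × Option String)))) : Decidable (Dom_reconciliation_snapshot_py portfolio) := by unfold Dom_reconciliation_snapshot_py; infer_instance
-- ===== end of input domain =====

-- B replaces A's three filtering comprehensions with a single counting pass over positions (same results; objective: simpler).


-- ===== PORT A =====
-- position.get(k) on the assoc-list dict: first match (Python dict has unique keys; lookup = first match per convention)
def pvGetA (p : List (String × Option String)) (k : String) : Option (Option String) :=
  match p with
  | [] => none
  | (k', v) :: rest => if k' == k then some v else pvGetA rest k
-- str(position.get(k) or ""): None and "" both become ""
def pvStrOrA (p : List (String × Option String)) (k : String) : String :=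
  match pvGetA p k with
  | some (some s) => s
  | _ => ""
-- isinstance(position, Mapping) is always true at this type
def pvIsOpenA (p : List (String × Option String)) : Bool :=
  pvStrOrA p "position_status" == "open" || pvStrOrA p "position_status" == "partial_close"
def pvIsMismatchA (p : List (String × Option String)) : Bool :=
  pvStrOrA p "reconciliation_status" == "mismatch"
-- not position.get("last_reconciled_at"): truthy iff present, non-None and non-empty
def pvIsPendingA (p : List (String × Option String)) : Bool :=
  match pvGetA p "last_reconciled_at" with
  | some (some s) => s == ""
  | _ => true
def pvClear : List (String × String) :=
  [("status", "clear"), ("note", "No session positions are open for reconciliation.")]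
def reconciliation_snapshot_py (portfolio : List (String × List (List (String × Option String)))) : List (String × String) :=
  match portfolio.lookup "positions" with
  | none => pvClear
  | some positions =>
    if positions.isEmpty then pvClear
    else
      let open_positions := positions.filter pvIsOpenA
      if open_positions.isEmpty then pvClear
      else
        let mismatch_positions := open_positions.filter pvIsMismatchA
        if !mismatch_positions.isEmpty then
          [("status", "mismatch"),
           ("note", PySem.Int.toStr (Int.ofNat mismatch_positions.length) ++ " open position(s) have broker reconciliation mismatches.")]
        else
          let pending_positions := open_positions.filter pvIsPendingA
          if !pending_positions.isEmpty then
            [("status", "pending"),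
             ("note", PySem.Int.toStr (Int.ofNat pending_positions.length) ++ " open position(s) are waiting for broker reconciliation.")]
          else
            [("status", "matched"), ("note", "Open positions match the broker inventory snapshot.")]

-- ===== PORT B =====
-- pvGetA/pvStrOrA/pvIsOpenA/pvIsMismatchA/pvIsPendingA above are shared: Source B contains the identical
-- get/str(... or "")/truthiness expressions; only the traversal differs.
-- one pass, three counters (Source B's single for-loop)
def pvCountStep (acc : Nat × Nat × Nat) (p : List (String × Option String)) : Nat × Nat × Nat :=
  if pvIsOpenA p then
    (acc.1 + 1,
     acc.2.1 + (if pvIsMismatchA p then 1 else 0),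
     acc.2.2 + (if pvIsPendingA p then 1 else 0))
  else acc
def reconciliation_snapshot_py_alt (portfolio : List (String × List (List (String × Option String)))) : List (String × String) :=
  match portfolio.lookup "positions" with
  | none => pvClear
  | some positions =>
    if positions.isEmpty then pvClear
    else
      let counts := positions.foldl pvCountStep (0, 0, 0)
      if counts.1 == 0 then pvClear
      else if counts.2.1 != 0 then
        [("status", "mismatch"),
         ("note", PySem.Int.toStr (Int.ofNat counts.2.1) ++ " open position(s) have broker reconciliation mismatches.")]
      else if counts.2.2 != 0 then
        [("status", "pending"),
         ("note", PySem.Int.toStr (Int.ofNat counts.2.2) ++ " open position(s) are waiting for broker reconciliation.")]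
      else
        [("status", "matched"), ("note", "Open positions match the broker inventory snapshot.")]

-- ===== PRECONDITION & SPEC =====
def Spec_reconciliation_snapshot_py (portfolio : List (String × List (List (String × Option String)))) (out : List (String × String)) : Prop := out = reconciliation_snapshot_py_alt portfolio
instance (portfolio : List (String × List (List (String × Option String)))) (out : List (String × String)) : Decidable (Spec_reconciliation_snapshot_py portfolio out) := by unfold Spec_reconciliation_snapshot_py; infer_instance

-- ===== CLAIM (what is proved, stated in full; the proofs are below) =====
def Claim_equal_reconciliation_snapshot_py : Prop := ∀ (portfolio : List (String × List (List (String × Option String)))), Dom_reconciliation_snapshot_py portfolio → Spec_reconciliation_snapshot_py portfolio (reconciliation_snapshot_py portfolio)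

-- ===== LEMMAS AND PROOFS =====
theorem pvFold_counts (l : List (List (String × Option String))) (a b c : Nat) :
    l.foldl pvCountStep (a, b, c) =
      (a + (l.filter pvIsOpenA).length,
       b + ((l.filter pvIsOpenA).filter pvIsMismatchA).length,
       c + ((l.filter pvIsOpenA).filter pvIsPendingA).length) := by
  induction l generalizing a b c with
  | nil => simp
  | cons hd tl ih =>
    simp only [List.foldl_cons, pvCountStep]
    by_cases h : pvIsOpenA hd
    · rw [if_pos h, ih]
      simp [List.filter_cons, h]
      by_cases h2 : pvIsMismatchA hd <;> by_cases h3 : pvIsPendingA hd <;>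
        simp [h2, h3] <;> omega
    · rw [if_neg h, ih]
      simp [h]

-- ===== VERDICT (by name: the statement is the Claim_ definition above) =====
theorem reconciliation_snapshot_py_spec : Claim_equal_reconciliation_snapshot_py := by
  intro portfolio _
  unfold Spec_reconciliation_snapshot_py reconciliation_snapshot_py reconciliation_snapshot_py_alt
  cases h : portfolio.lookup "positions" with
  | none => rfl
  | some positions =>
    simp only [pvFold_counts, Nat.zero_add]
    by_cases he : positions.isEmpty
    · simp [he]
    · simp only [he, if_false, Bool.false_eq_true]
      simp only [List.isEmpty_iff_length_eq_zero, Bool.not_eq_eq_eq_not, Bool.not_true,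
        decide_eq_false_iff_not, beq_iff_eq, bne_iff_ne, ne_eq]
      by_cases h1 : (positions.filter pvIsOpenA).length = 0
      · simp [h1]
      · rw [if_neg h1, if_neg h1]
        by_cases h2 : ((positions.filter pvIsOpenA).filter pvIsMismatchA).length = 0
        · have e2 : ((positions.filter pvIsOpenA).filter pvIsMismatchA).isEmpty = true :=
            List.isEmpty_iff_length_eq_zero.mpr h2
          rw [if_neg (by rw [e2]; exact (by decide)), if_neg (not_not_intro h2)]
          by_cases h3 : ((positions.filter pvIsOpenA).filter pvIsPendingA).length = 0
          · have e3 : ((positions.filter pvIsOpenA).filter pvIsPendingA).isEmpty = true :=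
              List.isEmpty_iff_length_eq_zero.mpr h3
            rw [if_neg (by rw [e3]; exact (by decide)), if_neg (not_not_intro h3)]
          · have e3 : ((positions.filter pvIsOpenA).filter pvIsPendingA).isEmpty = false :=
              Bool.eq_false_iff.mpr (fun ht => h3 (List.isEmpty_iff_length_eq_zero.mp ht))
            rw [if_pos e3, if_pos h3]
        · have e2 : ((positions.filter pvIsOpenA).filter pvIsMismatchA).isEmpty = false :=
            Bool.eq_false_iff.mpr (fun ht => h2 (List.isEmpty_iff_length_eq_zero.mp ht))
          rw [if_pos e2, if_pos h2]
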